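-- pv_equiv track=rewrite | github.com/Saikatriki2004/Leetcode2024 | December_2024/Dec_05.py | canChange
-- ===== SOURCE A (Python) =====
-- def canChange(start: str, target: str) -> bool:
--     # Extract indices and characters of 'L' and 'R' from both strings
--     start_positions = [(c, i) for i, c in enumerate(start) if c in 'LR']
--     target_positions = [(c, i) for i, c in enumerate(target) if c in 'LR']
--
--     # Check if the characters and their counts match
--     if len(start_positions) != len(target_positions):
--         return False
--
--     for (start_char, start_idx), (target_char, target_idx) in zip(start_positions, target_positions):
--         # Characters must match
--         if start_char != target_char:
--             return False
--         # Check movement constraints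
--         if start_char == 'L' and start_idx < target_idx:
--             return False
--         if start_char == 'R' and start_idx > target_idx:
--             return False
--
--     return True
-- ===== SOURCE B (Python) =====
-- def canChange(start: str, target: str) -> bool:
--     # Different algorithm: instead of pairing up L/R tokens and comparing their
--     # indices, check that the L/R skeletons are identical strings and verify a
--     # prefix-count invariant: at every prefix boundary, start must not have
--     # produced more L's than target (L only moves left) nor fewer R's (R only
--     # moves right).
--     if [c for c in start if c in 'LR'] != [c for c in target if c in 'LR']:
--         return False
--     n = max(len(start), len(target))
--     s = start.ljust(n, '_')
--     t = target.ljust(n, '_')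
--     sL = sR = tL = tR = 0
--     for a, b in zip(s, t):
--         if a == 'L':
--             sL += 1
--         elif a == 'R':
--             sR += 1
--         if b == 'L':
--             tL += 1
--         elif b == 'R':
--             tR += 1
--         if sL > tL or sR < tR:
--             return False
--     return True
-- ===== Notes on version B (the rewrite author's own statement) =====
-- stated objective: alternative
-- what changed: Replaced A's token-pairing algorithm (extract (char,index) pairs from both strings, compare lengths, zip and check each pair's indices) by a count-based one: the L/R skeletons must be equal as strings and four running prefix counters of L's and R's must satisfy sL <= tL and sR >= tR at every position of the two (underscore-padded) strings.
import Mathlib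
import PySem

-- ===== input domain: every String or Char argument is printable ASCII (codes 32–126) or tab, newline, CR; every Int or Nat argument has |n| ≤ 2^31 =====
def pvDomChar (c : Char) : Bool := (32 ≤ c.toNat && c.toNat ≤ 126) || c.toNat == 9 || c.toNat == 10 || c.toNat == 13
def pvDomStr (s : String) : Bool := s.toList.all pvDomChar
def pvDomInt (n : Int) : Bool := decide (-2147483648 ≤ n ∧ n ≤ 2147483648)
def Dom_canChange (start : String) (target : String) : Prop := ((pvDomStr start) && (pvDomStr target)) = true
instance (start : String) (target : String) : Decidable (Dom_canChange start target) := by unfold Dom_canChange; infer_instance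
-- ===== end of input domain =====

-- B replaces A's token-pairing algorithm (extract (char,index) pairs, zip, compare
-- indices pairwise) by a count-based one: L/R skeletons must be equal and a running
-- L/R prefix-counter invariant must hold at every position (alternative algorithm).

-- ===== PORT A =====
-- the for-loop over zip(start_positions, target_positions), early returns as written
def aGo : List ((Char × Int) × (Char × Int)) → Bool
  | [] => true
  | ((sc, si), (tc, ti)) :: rest =>
    if sc ≠ tc then false
    else if sc = 'L' ∧ si < ti then false
    else if sc = 'R' ∧ si > ti then false
    else aGo rest

def canChange (start : String) (target : String) : Bool :=
  let sp := ((PySem.List.enumerate start.toList 0).filter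
              (fun p => p.2 == 'L' || p.2 == 'R')).map (fun p => (p.2, p.1))
  let tp := ((PySem.List.enumerate target.toList 0).filter
              (fun p => p.2 == 'L' || p.2 == 'R')).map (fun p => (p.2, p.1))
  if sp.length ≠ tp.length then false
  else aGo (sp.zip tp)

-- ===== PORT B =====
def isLR (c : Char) : Bool := c == 'L' || c == 'R'

-- start.ljust(n, '_') on the char list (append underscores up to length n); exact
def pad (l : List Char) (n : Nat) : List Char := l ++ List.replicate (n - l.length) '_'

-- Source B's for-loop over zip(s, t) with the four running counters and early return
def bLoop : List (Char × Char) → Int → Int → Int → Int → Bool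
  | [], _, _, _, _ => true
  | (a, b) :: rest, sL, sR, tL, tR =>
    let p := if a == 'L' then (sL + 1, sR) else if a == 'R' then (sL, sR + 1) else (sL, sR)
    let q := if b == 'L' then (tL + 1, tR) else if b == 'R' then (tL, tR + 1) else (tL, tR)
    if p.1 > q.1 || p.2 < q.2 then false else bLoop rest p.1 p.2 q.1 q.2

def canChange_alt (start : String) (target : String) : Bool :=
  if start.toList.filter isLR ≠ target.toList.filter isLR then false
  else
    let n := max start.toList.length target.toList.length
    bLoop ((pad start.toList n).zip (pad target.toList n)) 0 0 0 0

-- ===== PRECONDITION & SPEC =====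
def Spec_canChange (start : String) (target : String) (out : Bool) : Prop := out = canChange_alt start target
instance (start : String) (target : String) (out : Bool) : Decidable (Spec_canChange start target out) := by unfold Spec_canChange; infer_instance

-- ===== CLAIM (what is proved, stated in full; the proofs are below) =====
def Claim_equal_canChange : Prop := ∀ (start : String) (target : String), Dom_canChange start target → Spec_canChange start target (canChange start target)

-- ===== LEMMAS AND PROOFS =====

-- the filtered enumeration A computes, in (char, index) form
def filt : List Char → Int → List (Char × Int)
  | [], _ => []
  | c :: s, i => if isLR c then (c, i) :: filt s (i + 1) else filt s (i + 1)

theorem filt_eq (l : List Char) (i : Int) :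
    ((PySem.List.enumerate l i).filter (fun p => p.2 == 'L' || p.2 == 'R')).map
      (fun p => (p.2, p.1)) = filt l i := by
  induction l generalizing i with
  | nil => simp [PySem.List.enumerate_nil, filt]
  | cons c s ih =>
    simp only [PySem.List.enumerate_cons, List.filter_cons, filt, isLR]
    by_cases h : (c == 'L' || c == 'R') = true <;> simp [h, ih]

-- A's length-check-then-zip-loop, as a single synchronous recursion
def pairCheck : List (Char × Int) → List (Char × Int) → Bool
  | [], [] => true
  | [], _ :: _ => false
  | _ :: _, [] => false
  | (sc, si) :: xs, (tc, ti) :: ys =>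
    if sc ≠ tc then false
    else if sc = 'L' ∧ si < ti then false
    else if sc = 'R' ∧ si > ti then false
    else pairCheck xs ys

theorem aGo_eq_pairCheck (sp tp : List (Char × Int)) :
    (if sp.length ≠ tp.length then false else aGo (sp.zip tp)) = pairCheck sp tp := by
  induction sp generalizing tp with
  | nil => cases tp <;> simp [pairCheck, aGo]
  | cons x xs ih =>
    cases tp with
    | nil => simp [pairCheck]
    | cons y ys =>
      obtain ⟨sc, si⟩ := x
      obtain ⟨tc, ti⟩ := y
      simp only [List.zip_cons_cons, aGo, pairCheck, List.length_cons]
      by_cases h1 : sc ≠ tc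
      · simp [h1]
      · by_cases h2 : sc = 'L' ∧ si < ti
        · simp [h2]
        · by_cases h3 : sc = 'R' ∧ si > ti
          · simp [h3]
          · have := ih ys
            simp only [h1, h2, h3, if_false] at *
            by_cases hl : xs.length = ys.length <;> simp [hl] at this ⊢ <;>
              simpa [hl] using this

-- the pairwise condition A checks on one pair
def Ok (x y : Char × Int) : Prop :=
  x.1 = y.1 ∧ (x.1 = 'L' → y.2 ≤ x.2) ∧ (x.1 = 'R' → x.2 ≤ y.2)

theorem pairCheck_iff (fs ft : List (Char × Int)) :
    pairCheck fs ft = true ↔ List.Forall₂ Ok fs ft := by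
  induction fs generalizing ft with
  | nil => cases ft <;> simp [pairCheck]
  | cons x xs ih =>
    cases ft with
    | nil => simp [pairCheck]
    | cons y ys =>
      obtain ⟨sc, si⟩ := x; obtain ⟨tc, ti⟩ := y
      simp only [pairCheck, List.forall₂_cons, ← ih, Ok]
      by_cases hr : pairCheck xs ys = true <;>
        split_ifs with h1 h2 h3 <;> simp_all

def Ls (fs : List (Char × Int)) : List Int := (fs.filter (fun x => x.1 == 'L')).map Prod.snd
def Rs (fs : List (Char × Int)) : List Int := (fs.filter (fun x => x.1 == 'R')).map Prod.snd

theorem forall2_ok_split (fs ft : List (Char × Int))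
    (hs : ∀ x ∈ fs, isLR x.1 = true) :
    List.Forall₂ Ok fs ft ↔
      fs.map Prod.fst = ft.map Prod.fst ∧
      List.Forall₂ (fun p q => q ≤ p) (Ls fs) (Ls ft) ∧
      List.Forall₂ (fun p q => p ≤ q) (Rs fs) (Rs ft) := by
  induction fs generalizing ft with
  | nil =>
    cases ft with
    | nil => simp [Ls, Rs]
    | cons y ys => simp [Ls, Rs]
  | cons x xs ih =>
    cases ft with
    | nil => simp [Ls, Rs]
    | cons y ys =>
      have hx : isLR x.1 = true := hs x (by simp)
      have ih' := ih ys (fun z hz => hs z (by simp [hz]))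
      obtain ⟨sc, si⟩ := x; obtain ⟨tc, ti⟩ := y
      simp only [isLR, Bool.or_eq_true, beq_iff_eq] at hx
      simp only [List.forall₂_cons, Ok, List.map_cons, List.cons.injEq, Ls, Rs,
        List.filter_cons] at ih' ⊢
      rcases hx with rfl | rfl
      · constructor
        · rintro ⟨⟨rfl, hL, hR⟩, hrest⟩
          have := (ih'.mp hrest)
          simp_all [List.forall₂_cons]
        · rintro ⟨⟨rfl, hmap⟩, hLs, hRs⟩
          simp only [beq_self_eq_true, if_pos, List.map_cons, List.forall₂_cons] at hLs
          refine ⟨⟨rfl, fun _ => hLs.1, fun h => by simp at h⟩, ?_⟩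
          exact ih'.mpr ⟨hmap, hLs.2, by simpa using hRs⟩
      · constructor
        · rintro ⟨⟨rfl, hL, hR⟩, hrest⟩
          have := (ih'.mp hrest)
          simp_all [List.forall₂_cons]
        · rintro ⟨⟨rfl, hmap⟩, hLs, hRs⟩
          simp only [beq_self_eq_true, if_pos, List.map_cons, List.forall₂_cons] at hRs
          refine ⟨⟨rfl, fun h => by simp at h, fun _ => hRs.1⟩, ?_⟩
          exact ih'.mpr ⟨hmap, by simpa using hLs, hRs.2⟩

theorem forall2_swap (X Y : List Int) :
    List.Forall₂ (fun p q => p ≤ q) X Y ↔ List.Forall₂ (fun p q => q ≤ p) Y X := by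
  induction X generalizing Y with
  | nil => cases Y <;> simp
  | cons x X' ih => cases Y <;> simp_all

def cntB (P : List Int) (i : Int) : Nat := (P.filter (fun p => decide (p < i))).length

theorem cntB_cons (p : Int) (P : List Int) (i : Int) :
    cntB (p :: P) i = (if p < i then 1 else 0) + cntB P i := by
  simp only [cntB, List.filter_cons]
  by_cases h : p < i
  · simp [h, Nat.add_comm]
  · simp [h]

theorem cntB_zero_of_ge (P : List Int) (i : Int) (h : ∀ p ∈ P, i ≤ p) : cntB P i = 0 := by
  simp [cntB, List.filter_eq_nil_iff]
  intro p hp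
  have := h p hp
  omega

theorem bridge (P Q : List Int) (hP : P.Pairwise (· < ·)) (hQ : Q.Pairwise (· < ·))
    (hlen : P.length = Q.length) :
    List.Forall₂ (fun p q => q ≤ p) P Q ↔ ∀ i : Int, cntB P i ≤ cntB Q i := by
  induction P generalizing Q with
  | nil =>
    cases Q with
    | nil => simp
    | cons q Q' => simp at hlen
  | cons p P' ih =>
    cases Q with
    | nil => simp at hlen
    | cons q Q' =>
      simp only [List.forall₂_cons]
      simp only [List.pairwise_cons] at hP hQ
      constructor
      · rintro ⟨hqp, hrest⟩ i
        rw [cntB_cons, cntB_cons]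
        have := (ih Q' hP.2 hQ.2 (by simpa using hlen)).mp hrest i
        have : cntB P' i ≤ cntB Q' i := this
        split_ifs <;> omega
      · intro h
        have hqp : q ≤ p := by
          have h1 := h (p + 1)
          rw [cntB_cons, cntB_cons, if_pos (by omega)] at h1
          by_cases hq : q < p + 1
          · omega
          · rw [if_neg hq] at h1
            have : cntB Q' (p + 1) = 0 :=
              cntB_zero_of_ge _ _ (fun x hx => by have := hQ.1 x hx; omega)
            omega
        refine ⟨hqp, (ih Q' hP.2 hQ.2 (by simpa using hlen)).mpr ?_⟩
        intro i
        have hi := h i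
        rw [cntB_cons, cntB_cons] at hi
        by_cases hpi : p < i
        · rw [if_pos hpi, if_pos (by omega)] at hi; omega
        · have : cntB P' i = 0 :=
            cntB_zero_of_ge _ _ (fun x hx => by have := hP.1 x hx; omega)
          omega

-- ===== facts about filt =====

theorem filt_fst (l : List Char) (i : Int) : (filt l i).map Prod.fst = l.filter isLR := by
  induction l generalizing i with
  | nil => simp [filt]
  | cons c s ih =>
    by_cases h : isLR c = true <;> simp [filt, h, ih]

theorem filt_ge (l : List Char) (i : Int) : ∀ x ∈ filt l i, i ≤ x.2 := by
  induction l generalizing i with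
  | nil => simp [filt]
  | cons c s ih =>
    intro x hx
    by_cases h : isLR c = true <;> simp [filt, h] at hx
    · rcases hx with rfl | hx
      · exact le_refl _
      · have := ih (i + 1) x hx; omega
    · have := ih (i + 1) x hx; omega

theorem filt_sorted (l : List Char) (i : Int) :
    (filt l i).Pairwise (fun x y => x.2 < y.2) := by
  induction l generalizing i with
  | nil => simp [filt]
  | cons c s ih =>
    by_cases h : isLR c = true
    · simp only [filt, if_pos h]
      refine List.Pairwise.cons ?_ (ih (i + 1))
      intro y hy
      have := filt_ge s (i + 1) y hy
      omega
    · simp only [filt, if_neg h]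
      exact ih (i + 1)

theorem filt_isLR (l : List Char) (i : Int) : ∀ x ∈ filt l i, isLR x.1 = true := by
  induction l generalizing i with
  | nil => simp [filt]
  | cons c s ih =>
    intro x hx
    by_cases h : isLR c = true <;> simp [filt, h] at hx
    · rcases hx with rfl | hx
      · exact h
      · exact ih (i + 1) x hx
    · exact ih (i + 1) x hx

theorem Ls_sorted (fs : List (Char × Int)) (h : fs.Pairwise (fun x y => x.2 < y.2)) :
    (Ls fs).Pairwise (· < ·) := List.Pairwise.map _ (fun _ _ h => h) (h.filter _)

theorem Rs_sorted (fs : List (Char × Int)) (h : fs.Pairwise (fun x y => x.2 < y.2)) :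
    (Rs fs).Pairwise (· < ·) := List.Pairwise.map _ (fun _ _ h => h) (h.filter _)

theorem Ls_len_eq (fs ft : List (Char × Int)) (h : fs.map Prod.fst = ft.map Prod.fst) :
    (Ls fs).length = (Ls ft).length := by
  induction fs generalizing ft with
  | nil => cases ft <;> simp_all [Ls]
  | cons x xs ih =>
    cases ft with
    | nil => simp at h
    | cons y ys =>
      simp only [List.map_cons, List.cons.injEq] at h
      simp only [Ls, List.filter_cons, h.1]
      by_cases hx : (y.1 == 'L') = true <;>
        simp [hx, Ls] at ih ⊢ <;> exact ih ys h.2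

theorem Rs_len_eq (fs ft : List (Char × Int)) (h : fs.map Prod.fst = ft.map Prod.fst) :
    (Rs fs).length = (Rs ft).length := by
  induction fs generalizing ft with
  | nil => cases ft <;> simp_all [Rs]
  | cons x xs ih =>
    cases ft with
    | nil => simp at h
    | cons y ys =>
      simp only [List.map_cons, List.cons.injEq] at h
      simp only [Rs, List.filter_cons, h.1]
      by_cases hx : (y.1 == 'R') = true <;>
        simp [hx, Rs] at ih ⊢ <;> exact ih ys h.2

theorem cnt_filt (l : List Char) (j i : Int) (c : Char) (hc : isLR c = true) :
    cntB (((filt l j).filter (fun x => x.1 == c)).map Prod.snd) i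
      = (l.take (i - j).toNat).count c := by
  induction l generalizing j with
  | nil => simp [filt, cntB]
  | cons a s ih =>
    rcases le_or_gt i j with hij | hij
    · have h0 : (i - j).toNat = 0 := by omega
      have hz : ∀ (m : List Char) (k : Int), i ≤ k →
          cntB (((filt m k).filter (fun x => x.1 == c)).map Prod.snd) i = 0 := by
        intro m
        induction m with
        | nil => simp [filt, cntB]
        | cons b m' ihm =>
          intro k hk
          by_cases hb : isLR b = true
          · simp only [filt, if_pos hb, List.filter_cons]
            by_cases hbc : (b == c) = true
            · simp only [if_pos hbc, List.map_cons, cntB_cons, if_neg (by omega : ¬ k < i)]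
              simpa using ihm (k+1) (by omega)
            · simp only [if_neg hbc]
              exact ihm (k+1) (by omega)
          · simp only [filt, if_neg hb]
            exact ihm (k+1) (by omega)
      rw [hz (a :: s) j hij, h0]
      simp
    · have h0 : (i - j).toNat = (i - (j+1)).toNat + 1 := by omega
      by_cases ha : isLR a = true
      · simp only [filt, if_pos ha, List.filter_cons]
        by_cases hac : (a == c) = true
        · have : a = c := by simpa using hac
          subst this
          simp only [if_pos hac, List.map_cons, cntB_cons, if_pos hij, ih (j+1),
            h0, List.take_succ_cons, List.count_cons]
          omega
        · have hne : a ≠ c := by simpa using hac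
          simp only [if_neg hac, ih (j+1), h0, List.take_succ_cons, List.count_cons]
          simp
      · have hne : a ≠ c := by intro h; rw [h] at ha; exact absurd hc ha
        simp only [filt, if_neg ha, ih (j+1), h0, List.take_succ_cons, List.count_cons]
        simp [hne]

theorem cntB_Ls (l : List Char) (j i : Int) :
    cntB (Ls (filt l j)) i = (l.take (i - j).toNat).count 'L' := by
  simpa [Ls] using cnt_filt l j i 'L' (by decide)

theorem cntB_Rs (l : List Char) (j i : Int) :
    cntB (Rs (filt l j)) i = (l.take (i - j).toNat).count 'R' := by
  simpa [Rs] using cnt_filt l j i 'R' (by decide)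

theorem pad_count (u : List Char) (n : Nat) (c : Char) (hc : c ≠ '_') (i : Nat) :
    ((pad u n).take i).count c = (u.take i).count c := by
  unfold pad
  rw [List.take_append, List.count_append]
  have : (List.take (i - u.length) (List.replicate (n - u.length) '_')).count c = 0 := by
    rw [List.take_replicate, List.count_replicate]
    simp [Ne.symm hc]
  omega

theorem count_take_shift (a c : Char) (u : List Char) (i : Nat) (x : Int) :
    x + (((a :: u).take (i+1+1)).count c : Int)
      = (if a == c then x + 1 else x) + ((u.take (i+1)).count c : Int) := by
  rw [List.take_succ_cons, List.count_cons]
  by_cases h : (a == c) = true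
  · simp [h]
    omega
  · simp [h]

theorem count_take_one (a c : Char) (u : List Char) (x : Int) :
    x + (((a :: u).take 1).count c : Int) = (if a == c then x + 1 else x) := by
  have : (a :: u).take 1 = [a] := by simp
  rw [this, List.count_singleton]
  by_cases h : (a == c) = true <;> simp [h]

theorem bLoop_iff (u : List Char) (v : List Char) (sL sR tL tR : Int) (hlen : u.length = v.length) :
    bLoop (u.zip v) sL sR tL tR = true ↔
      ∀ i : Nat, i < u.length →
        (sL + ((u.take (i+1)).count 'L' : Int) ≤ tL + ((v.take (i+1)).count 'L' : Int) ∧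
         tR + ((v.take (i+1)).count 'R' : Int) ≤ sR + ((u.take (i+1)).count 'R' : Int)) := by
  induction u generalizing v sL sR tL tR with
  | nil => simp [bLoop]
  | cons a u' ih =>
    cases v with
    | nil => simp at hlen
    | cons b v' =>
      have hlen' : u'.length = v'.length := by simpa using hlen
      simp only [List.zip_cons_cons, bLoop]
      set sL' := if a == 'L' then sL + 1 else sL with hsL'
      set sR' := if a == 'R' then sR + 1 else sR with hsR'
      set tL' := if b == 'L' then tL + 1 else tL with htL'
      set tR' := if b == 'R' then tR + 1 else tR with htR'
      have hp : (if a == 'L' then (sL + 1, sR) else if a == 'R' then (sL, sR + 1) else (sL, sR)) = (sL', sR') := by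
        by_cases h1 : (a == 'L') = true <;> by_cases h2 : (a == 'R') = true <;>
          simp_all
      have hq : (if b == 'L' then (tL + 1, tR) else if b == 'R' then (tL, tR + 1) else (tL, tR)) = (tL', tR') := by
        by_cases h1 : (b == 'L') = true <;> by_cases h2 : (b == 'R') = true <;>
          simp_all
      rw [hp, hq]
      constructor
      · intro hb i hi
        have hbad : ¬ ((sL' > tL' || sR' < tR') = true) := by
          intro h; rw [if_pos h] at hb; exact Bool.false_ne_true hb
        rw [if_neg hbad] at hb
        simp only [Bool.or_eq_true, not_or, decide_eq_true_eq, not_lt] at hbad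
        cases i with
        | zero =>
          rw [count_take_one, count_take_one, count_take_one, count_take_one]
          exact ⟨hbad.1, hbad.2⟩
        | succ i' =>
          have := ((ih v' sL' sR' tL' tR' hlen').mp hb) i' (by simpa using hi)
          rw [count_take_shift, count_take_shift, count_take_shift, count_take_shift]
          exact this
      · intro h
        have h0 := h 0 (by simp)
        rw [count_take_one, count_take_one, count_take_one, count_take_one] at h0
        have hbad : ¬ ((sL' > tL' || sR' < tR') = true) := by
          simp only [Bool.or_eq_true, not_or, decide_eq_true_eq, not_lt]
          exact h0
        rw [if_neg hbad]
        rw [ih v' sL' sR' tL' tR' hlen']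
        intro i hi
        have := h (i+1) (by simpa using Nat.succ_lt_succ hi)
        rw [count_take_shift, count_take_shift, count_take_shift, count_take_shift] at this
        exact this

theorem ext_counts (u w : List Char) (c : Char) (n : Nat) (hu : u.length ≤ n) (hw : w.length ≤ n) :
    (∀ i : Nat, i < n → (u.take (i+1)).count c ≤ (w.take (i+1)).count c) ↔
    (∀ k : Int, (u.take k.toNat).count c ≤ (w.take k.toNat).count c) := by
  constructor
  · intro h k
    rcases Nat.eq_zero_or_pos k.toNat with h0 | hpos
    · simp [h0]
    · by_cases hm : k.toNat ≤ n
      · have := h (k.toNat - 1) (by omega)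
        rwa [show k.toNat - 1 + 1 = k.toNat from by omega] at this
      · rcases Nat.eq_zero_or_pos n with hn | hn
        · have hu0 : u = [] := List.eq_nil_of_length_eq_zero (by omega)
          have hw0 : w = [] := List.eq_nil_of_length_eq_zero (by omega)
          simp [hu0, hw0]
        · have := h (n-1) (by omega)
          rw [show n - 1 + 1 = n from by omega,
              List.take_of_length_le (by omega), List.take_of_length_le (by omega)] at this
          rwa [List.take_of_length_le (by omega), List.take_of_length_le (by omega)]
  · intro h i hi
    have := h ((i : Int) + 1)
    rwa [show ((i : Int) + 1).toNat = i + 1 from by omega] at this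

theorem main_iff (s t : List Char) :
    pairCheck (filt s 0) (filt t 0) = true ↔
      (s.filter isLR = t.filter isLR ∧
       bLoop ((pad s (max s.length t.length)).zip (pad t (max s.length t.length))) 0 0 0 0 = true) := by
  have hns : s.length ≤ max s.length t.length := le_max_left _ _
  have hnt : t.length ≤ max s.length t.length := le_max_right _ _
  have hps : (pad s (max s.length t.length)).length = max s.length t.length := by
    simp only [pad, List.length_append, List.length_replicate]; omega
  have hpt : (pad t (max s.length t.length)).length = max s.length t.length := by
    simp only [pad, List.length_append, List.length_replicate]; omega
  rw [pairCheck_iff, forall2_ok_split _ _ (filt_isLR s 0), filt_fst, filt_fst,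
      bLoop_iff _ _ _ _ _ _ (by rw [hps, hpt])]
  have hsort_s := filt_sorted s 0
  have hsort_t := filt_sorted t 0
  constructor
  · rintro ⟨hmap, hLs, hRs⟩
    have hmap' : (filt s 0).map Prod.fst = (filt t 0).map Prod.fst := by
      rw [filt_fst, filt_fst]; exact hmap
    refine ⟨hmap, ?_⟩
    have hL := (bridge _ _ (Ls_sorted _ hsort_s) (Ls_sorted _ hsort_t)
      (Ls_len_eq _ _ hmap')).mp hLs
    have hR := (bridge _ _ (Rs_sorted _ hsort_t) (Rs_sorted _ hsort_s)
      ((Rs_len_eq _ _ hmap').symm)).mp ((forall2_swap _ _).mp hRs)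
    have hLk : ∀ k : Int, (s.take k.toNat).count 'L' ≤ (t.take k.toNat).count 'L' := by
      intro k
      have := hL k
      rwa [cntB_Ls, cntB_Ls, sub_zero] at this
    have hRk : ∀ k : Int, (t.take k.toNat).count 'R' ≤ (s.take k.toNat).count 'R' := by
      intro k
      have := hR k
      rwa [cntB_Rs, cntB_Rs, sub_zero] at this
    intro i hi
    rw [hps] at hi
    have h1 := (ext_counts s t 'L' _ hns hnt).mpr hLk i hi
    have h2 := (ext_counts t s 'R' _ hnt hns).mpr hRk i hi
    rw [pad_count s _ 'L' (by decide), pad_count t _ 'L' (by decide),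
        pad_count s _ 'R' (by decide), pad_count t _ 'R' (by decide)]
    constructor <;> omega
  · rintro ⟨hmap, hcond⟩
    have hmap' : (filt s 0).map Prod.fst = (filt t 0).map Prod.fst := by
      rw [filt_fst, filt_fst]; exact hmap
    have hcondL : ∀ i : Nat, i < max s.length t.length →
        (s.take (i+1)).count 'L' ≤ (t.take (i+1)).count 'L' := by
      intro i hi
      have := (hcond i (by rw [hps]; exact hi)).1
      rw [pad_count s _ 'L' (by decide), pad_count t _ 'L' (by decide)] at this
      omega
    have hcondR : ∀ i : Nat, i < max s.length t.length →
        (t.take (i+1)).count 'R' ≤ (s.take (i+1)).count 'R' := by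
      intro i hi
      have := (hcond i (by rw [hps]; exact hi)).2
      rw [pad_count s _ 'R' (by decide), pad_count t _ 'R' (by decide)] at this
      omega
    refine ⟨hmap, ?_, ?_⟩
    · apply (bridge _ _ (Ls_sorted _ hsort_s) (Ls_sorted _ hsort_t) (Ls_len_eq _ _ hmap')).mpr
      intro k
      rw [cntB_Ls, cntB_Ls, sub_zero]
      exact (ext_counts s t 'L' _ hns hnt).mp hcondL k
    · apply (forall2_swap _ _).mpr
      apply (bridge _ _ (Rs_sorted _ hsort_t) (Rs_sorted _ hsort_s)
        ((Rs_len_eq _ _ hmap').symm)).mpr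
      intro k
      rw [cntB_Rs, cntB_Rs, sub_zero]
      exact (ext_counts t s 'R' _ hnt hns).mp hcondR k

-- ===== VERDICT (by name: the statement is the Claim_ definition above) =====
theorem canChange_spec : Claim_equal_canChange := by
  intro start target _
  unfold Spec_canChange canChange
  simp only [filt_eq]
  rw [aGo_eq_pairCheck]
  have halt : canChange_alt start target =
      (if start.toList.filter isLR ≠ target.toList.filter isLR then false
       else bLoop ((pad start.toList (max start.toList.length target.toList.length)).zip
                   (pad target.toList (max start.toList.length target.toList.length))) 0 0 0 0) := rfl
  rw [halt]
  by_cases hf : start.toList.filter isLR ≠ target.toList.filter isLR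
  · rw [if_pos hf]
    rcases h : pairCheck (filt start.toList 0) (filt target.toList 0) with _ | _
    · rfl
    · exact absurd ((main_iff _ _).mp h).1 hf
  · rw [if_neg hf]
    have hf' := not_not.mp hf
    rcases h : pairCheck (filt start.toList 0) (filt target.toList 0) with _ | _
    · rcases hb : bLoop ((pad start.toList (max start.toList.length target.toList.length)).zip
          (pad target.toList (max start.toList.length target.toList.length))) 0 0 0 0 with _ | _
      · rfl
      · exact absurd ((main_iff _ _).mpr ⟨hf', hb⟩) (by rw [h]; simp)
    · exact ((main_iff _ _).mp h).2.symm
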